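-- pv_equiv track=rewrite | github.com/david05-cmd/practicas | Tarea2.py | minusculas
-- ===== SOURCE A (Python) =====
-- def minusculas(cad):  # Español: Define función para verificar minúsculas después del primer carácter.  # English: Define function to check lowercase after first character.
--     a = False  # Español: Inicializa bandera como falsa.  # English: Initialize flag as false.
--     for i in cad[1:]:  # Español: Itera desde el segundo carácter hasta el final.  # English: Iterate from second character to end.
--         if ord(i) >= 97 and ord(i) <=122:  # Español: Verifica si es minúscula (código ASCII).  # English: Check if lowercase (ASCII code).
--                 pass  # Español: No hace nada si es minúscula.  # English: Do nothing if lowercase.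
--         else:  # Español: Si no es minúscula.  # English: If not lowercase.
--             return a  # Español: Retorna falso inmediatamente.  # English: Return false immediately.
--     a = True  # Español: Si todos los caracteres son minúsculas.  # English: If all characters are lowercase.
--     return a  # Español: Retorna verdadero.  # English: Return true.
-- ===== SOURCE B (Python) =====
-- def minusculas(cad):
--     return set(cad[1:]) <= set("abcdefghijklmnopqrstuvwxyz")
-- ===== Notes on version B (the rewrite author's own statement) =====
-- stated objective: simpler
-- what changed: Replaces the flag-and-early-return ord-range scan with a one-line subset test of the deduplicated character set of cad[1:] against the literal lowercase alphabet; the C-implemented set operations also make it measurably faster.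
import Mathlib
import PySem

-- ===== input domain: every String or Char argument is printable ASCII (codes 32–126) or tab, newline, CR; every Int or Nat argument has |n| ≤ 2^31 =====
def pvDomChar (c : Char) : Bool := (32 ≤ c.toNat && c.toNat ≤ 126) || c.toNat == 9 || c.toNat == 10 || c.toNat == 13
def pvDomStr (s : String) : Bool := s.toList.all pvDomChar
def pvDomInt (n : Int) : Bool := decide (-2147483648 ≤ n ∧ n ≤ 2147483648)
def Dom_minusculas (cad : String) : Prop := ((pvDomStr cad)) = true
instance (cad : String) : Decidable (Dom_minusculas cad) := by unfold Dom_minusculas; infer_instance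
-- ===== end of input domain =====

-- B replaces A's flag-and-early-return ord-range scan by a set-subset test against the
-- literal lowercase alphabet (objective: simpler).

-- ===== PORT A =====
-- the for-loop over cad[1:] with its early 'return a' (a = False), then 'a = True; return a'
def minusculasLoopA : List Char → Bool
  | [] => true
  | c :: rest => if 97 ≤ c.toNat ∧ c.toNat ≤ 122 then minusculasLoopA rest else false

def minusculas (cad : String) : Bool :=
  minusculasLoopA (PySem.List.slice cad.toList (some 1) none)

-- ===== PORT B =====
def minusculas_alt (cad : String) : Bool :=
  PySem.Set.issubset (PySem.Set.ofList (PySem.List.slice cad.toList (some 1) none))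
    ("abcdefghijklmnopqrstuvwxyz".toList)

-- ===== PRECONDITION & SPEC =====
def Spec_minusculas (cad : String) (out : Bool) : Prop := out = minusculas_alt cad
instance (cad : String) (out : Bool) : Decidable (Spec_minusculas cad out) := by unfold Spec_minusculas; infer_instance

-- ===== CLAIM (what is proved, stated in full; the proofs are below) =====
def Claim_equal_minusculas : Prop := ∀ (cad : String), Dom_minusculas cad → Spec_minusculas cad (minusculas cad)

-- ===== LEMMAS AND PROOFS =====
theorem mem_abc (c : Char) :
    (c ∈ "abcdefghijklmnopqrstuvwxyz".toList) ↔ (97 ≤ c.toNat ∧ c.toNat ≤ 122) := by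
  have hinj : Function.Injective Char.toNat := fun a b h => Char.ext (UInt32.toNat_inj.mp h)
  rw [← List.mem_map_of_injective hinj]
  have h2 : ("abcdefghijklmnopqrstuvwxyz".toList).map Char.toNat =
      [97,98,99,100,101,102,103,104,105,106,107,108,109,110,111,112,113,
       114,115,116,117,118,119,120,121,122] := by decide
  rw [h2]; simp; omega

theorem loopA_iff (l : List Char) :
    minusculasLoopA l = true ↔ ∀ c ∈ l, 97 ≤ c.toNat ∧ c.toNat ≤ 122 := by
  induction l with
  | nil => simp [minusculasLoopA]
  | cons c rest ih =>
      simp only [minusculasLoopA]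
      by_cases h : 97 ≤ c.toNat ∧ c.toNat ≤ 122 <;> simp [h, ih]

theorem key (l : List Char) :
    minusculasLoopA l =
      PySem.Set.issubset (PySem.Set.ofList l) ("abcdefghijklmnopqrstuvwxyz".toList) := by
  apply Bool.eq_iff_iff.mpr
  rw [loopA_iff, PySem.Set.issubset_iff]
  constructor
  · intro h c hc
    exact (mem_abc c).mpr (h c ((PySem.Set.mem_ofList _ _).mp hc))
  · intro h c hc
    exact (mem_abc c).mp (h c ((PySem.Set.mem_ofList _ _).mpr hc))

-- ===== VERDICT (by name: the statement is the Claim_ definition above) =====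
theorem minusculas_spec : Claim_equal_minusculas := by
  intro cad _
  unfold Spec_minusculas minusculas minusculas_alt
  exact key _
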